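-- pv_equiv track=rewrite | github.com/redhat-performance/zathras | post_processing/processors/coremark_processor.py | _group_time_series_by_run
-- ===== SOURCE A (Python) =====
-- from typing import Dict, Any, List, Optional
--
-- def _group_time_series_by_run(time_series_data: List[Dict]) -> List[List[Dict]]:
--     """
--     Group time series data by run number
--
--     CSV format: iteration:threads:IterationsPerSec
--     Rows with same iteration = different run
--
--     Example:
--     1:4:193245  <- Run 1, iteration 1
--     1:4:195999  <- Run 2, iteration 1
--     2:4:190905  <- Run 1, iteration 2
--     2:4:191537  <- Run 2, iteration 2
--     """
--     if not time_series_data: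
--         return []
--
--     # Group by iteration number
--     iterations = {}
--     for row in time_series_data:
--         iter_num = row.get('iteration', 1)
--         if iter_num not in iterations:
--             iterations[iter_num] = []
--         iterations[iter_num].append(row)
--
--     # Number of runs = max measurements per iteration
--     num_runs = max(len(rows) for rows in iterations.values()) if iterations else 0
--
--     # Create run groups
--     runs = [[] for _ in range(num_runs)]
--
--     for iter_num in sorted(iterations.keys()):
--         measurements = iterations[iter_num]
--         for run_idx, measurement in enumerate(measurements):
--             if run_idx < num_runs:
--                 runs[run_idx].append(measurement)
--
--     return runs
-- ===== SOURCE B (Python) =====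
-- from typing import Dict, List
--
--
-- def _group_time_series_by_run(time_series_data: List[Dict]) -> List[List[Dict]]:
--     """Group time series rows into per-run lists by iteration number."""
--     if not time_series_data:
--         return []
--     keys = sorted({row.get('iteration', 1) for row in time_series_data})
--     groups = [[row for row in time_series_data
--                if row.get('iteration', 1) == k] for k in keys]
--     num_runs = max(len(g) for g in groups)
--     return [[g[j] for g in groups if j < len(g)] for j in range(num_runs)]
-- ===== Notes on version B (the rewrite author's own statement) =====
-- stated objective: simpler
-- what changed: B replaces A's mutable dict-grouping plus index-mutating distribution loop over preallocated run lists by a direct comprehension pipeline: sorted set of iteration keys, per-key groups by filtering, and each run built directly as the j-th element of every group that has one.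
import Mathlib
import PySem

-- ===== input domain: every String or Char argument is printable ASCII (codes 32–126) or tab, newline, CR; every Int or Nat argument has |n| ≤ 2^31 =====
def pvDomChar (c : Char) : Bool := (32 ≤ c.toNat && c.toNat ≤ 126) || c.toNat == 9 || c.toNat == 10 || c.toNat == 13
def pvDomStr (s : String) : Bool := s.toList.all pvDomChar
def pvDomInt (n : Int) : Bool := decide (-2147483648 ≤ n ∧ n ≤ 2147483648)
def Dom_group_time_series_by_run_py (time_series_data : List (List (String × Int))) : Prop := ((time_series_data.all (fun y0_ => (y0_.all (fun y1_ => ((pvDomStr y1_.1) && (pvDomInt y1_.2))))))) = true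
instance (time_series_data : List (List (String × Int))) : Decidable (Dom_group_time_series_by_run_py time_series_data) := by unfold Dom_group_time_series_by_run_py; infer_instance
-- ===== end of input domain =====

-- B replaces A's dict-grouping + index-mutating distribution loop by a sorted-keys /
-- filter-groups / per-run comprehension pipeline (objective: simpler; not faster).

-- ===== PORT A =====
-- row.get('iteration', 1): first match in the association list (shared accessor of both ports)
def pvIter (row : List (String × Int)) : Int :=
  PySem.Dict.getD ⟨row⟩ "iteration" 1

def group_time_series_by_run_py (time_series_data : List (List (String × Int))) : List (List (List (String × Int))) :=
  if time_series_data = [] then []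
  else
    -- Group by iteration number
    let iterations : PySem.Dict Int (List (List (String × Int))) :=
      time_series_data.foldl (fun d row =>
        let iter_num := pvIter row
        let d' := if d.contains iter_num then d else d.insert iter_num []
        d'.modify iter_num [] (fun ms => ms ++ [row])) PySem.Dict.empty
    -- num_runs = max measurements per iteration ('max(...) if iterations else 0';
    -- '.getD 0' only strips the Option: in the guarded branch max? is 'some')
    let num_runs : Nat :=
      if iterations.items = [] then 0
      else ((PySem.List.max? (iterations.values.map List.length) (fun x => x)).getD 0)
    let runs0 : List (List (List (String × Int))) := List.replicate num_runs []
    (PySem.List.sorted iterations.keys (fun k => k)).foldl (fun runs iter_num =>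
      let measurements := iterations.getD iter_num []
      (PySem.List.enumerate measurements).foldl (fun runs p =>
        if p.1 < (num_runs : Int) then
          PySem.List.pySetD runs p.1 (PySem.List.pyGetD runs p.1 [] ++ [p.2])
        else runs) runs) runs0

-- ===== PORT B =====
def group_time_series_by_run_py_alt (time_series_data : List (List (String × Int))) : List (List (List (String × Int))) :=
  if time_series_data = [] then []
  else
    let keys := PySem.List.sorted (PySem.Set.ofList (time_series_data.map pvIter)) (fun k => k)
    let groups := keys.map (fun k => time_series_data.filter (fun row => pvIter row == k))
    let num_runs : Int := (PySem.List.max? (groups.map (fun g => (g.length : Int))) (fun x => x)).getD 0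
    (PySem.List.pyRange 0 num_runs).map (fun j =>
      (groups.filter (fun g => decide (j < (g.length : Int)))).map (fun g => PySem.List.pyGetD g j []))

-- ===== PRECONDITION & SPEC =====
def Spec_group_time_series_by_run_py (time_series_data : List (List (String × Int))) (out : List (List (List (String × Int)))) : Prop := out = group_time_series_by_run_py_alt time_series_data
instance (time_series_data : List (List (String × Int))) (out : List (List (List (String × Int)))) : Decidable (Spec_group_time_series_by_run_py time_series_data out) := by unfold Spec_group_time_series_by_run_py; infer_instance

-- ===== CLAIM (what is proved, stated in full; the proofs are below) =====
def Claim_equal_group_time_series_by_run_py : Prop := ∀ (time_series_data : List (List (String × Int))), Dom_group_time_series_by_run_py time_series_data → Spec_group_time_series_by_run_py time_series_data (group_time_series_by_run_py time_series_data)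

-- ===== LEMMAS AND PROOFS =====

-- the group of rows with iteration key k
def pvGroup (tsd : List (List (String × Int))) (k : Int) : List (List (String × Int)) :=
  tsd.filter (fun row => pvIter row == k)

lemma pvGetD_of_not_contains {κ ν : Type} [BEq κ] (d : PySem.Dict κ ν) (k : κ) (dflt : ν)
    (h : d.contains k = false) : d.getD k dflt = dflt := by
  simp only [PySem.Dict.getD, PySem.Dict.get?]
  have hf : d.items.find? (fun p => p.1 == k) = none := by
    rw [List.find?_eq_none]
    rintro ⟨a, b⟩ hp
    simp only [PySem.Dict.contains] at h
    rw [List.any_eq_false] at h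
    simpa using h ⟨a, b⟩ hp
  simp [hf]

-- A's dict-building step is plain 'modify'
lemma pvStepA_eq (d : PySem.Dict Int (List (List (String × Int)))) (row : List (String × Int)) :
    (if d.contains (pvIter row) then d else d.insert (pvIter row) []).modify (pvIter row) []
      (fun ms => ms ++ [row]) = d.modify (pvIter row) [] (fun ms => ms ++ [row]) := by
  by_cases h : d.contains (pvIter row)
  · simp [h]
  · simp only [Bool.not_eq_true] at h
    simp only [h, Bool.false_eq_true, if_false]
    simp [PySem.Dict.modify, PySem.Dict.insert_insert_self,
      pvGetD_of_not_contains d _ _ h]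

-- max? is some on a nonempty list
lemma pvMax?_isSome {α : Type} [LinearOrder α] (xs : List α) (h : xs ≠ []) :
    (PySem.List.max? xs (fun x => x)).isSome := by
  have aux : ∀ (ys : List α) (m : α), (List.foldl
      (fun acc x => match acc with
        | none => some x
        | some m => if (fun x => x) m < (fun x => x) x then some x else some m) (some m) ys).isSome := by
    intro ys
    induction ys with
    | nil => intro m; simp
    | cons y ys ih => intro m; simp only [List.foldl_cons]; split <;> exact ih _
  cases xs with
  | nil => simp at h
  | cons x xs => simpa [PySem.List.max?] using aux xs x

-- with the identity key, max? returns exactly the maximum value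
lemma pvMax?_eq_some {α : Type} [LinearOrder α] (xs : List α) (m : α)
    (h1 : m ∈ xs) (h2 : ∀ y ∈ xs, y ≤ m) :
    PySem.List.max? xs (fun x => x) = some m := by
  have hs := pvMax?_isSome xs (List.ne_nil_of_mem h1)
  rcases hb : PySem.List.max? xs (fun x => x) with _ | b
  · rw [hb] at hs; simp at hs
  · have hmb : m ≤ b := PySem.List.max?_isMax hb m h1
    have hbm : b ≤ m := h2 b (PySem.List.max?_mem hb)
    simp [le_antisymm hbm hmb]

-- B's per-run comprehension is the flatMap of optional j-th elements
lemma pvFilterMap_eq_flatMap (G : Int → List (List (String × Int))) (K : List Int) (j : Nat) :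
    ((K.map (fun k => G k)).filter (fun g => decide ((j : Int) < (g.length : Int)))).map
        (fun g => PySem.List.pyGetD g (j : Int) [])
      = K.flatMap (fun k => ((G k)[j]?).toList) := by
  induction K with
  | nil => simp
  | cons k K ih =>
    simp only [List.map_cons, List.filter_cons, List.flatMap_cons]
    by_cases h : j < (G k).length
    · rw [if_pos (decide_eq_true (by exact_mod_cast h))]
      rw [List.map_cons, ih]
      rw [PySem.List.pyGetD_natCast, List.getD_eq_getElem?_getD, List.getElem?_eq_getElem h]
      simp
    · rw [if_neg (by simp only [decide_eq_true_eq]; exact_mod_cast h)]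
      rw [ih, List.getElem?_eq_none (by omega : (G k).length ≤ j)]
      simp

-- inner distribution loop of A: appends g's elements at positions s, s+1, …
lemma pvInner (N : Nat) (g : List (List (String × Int))) :
    ∀ (s : Nat) (rss : List (List (List (String × Int)))),
      rss.length = N → s + g.length ≤ N →
      ((PySem.List.enumerate g (s : Int)).foldl (fun runs p =>
          if p.1 < (N : Int) then
            PySem.List.pySetD runs p.1 (PySem.List.pyGetD runs p.1 [] ++ [p.2])
          else runs) rss).length = N ∧
      ∀ j : Nat, ((PySem.List.enumerate g (s : Int)).foldl (fun runs p =>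
          if p.1 < (N : Int) then
            PySem.List.pySetD runs p.1 (PySem.List.pyGetD runs p.1 [] ++ [p.2])
          else runs) rss).getD j []
        = rss.getD j [] ++ (if s ≤ j then ((g[(j - s)]?).toList) else []) := by
  induction g with
  | nil =>
    intro s rss hlen _hb
    refine ⟨by simpa [PySem.List.enumerate_nil] using hlen, fun j => ?_⟩
    simp [PySem.List.enumerate_nil]
  | cons x g ih =>
    intro s rss hlen hb
    simp only [List.length_cons] at hb
    simp only [PySem.List.enumerate_cons, List.foldl_cons]
    rw [if_pos (show (s : Int) < (N : Int) by exact_mod_cast (by omega : s < N))]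
    rw [PySem.List.pySetD_natCast, PySem.List.pyGetD_natCast]
    have hc : (s : Int) + 1 = ((s + 1 : Nat) : Int) := by push_cast; ring
    rw [hc]
    obtain ⟨L, H⟩ := ih (s + 1) (rss.set s (rss.getD s [] ++ [x]))
      (by simpa using hlen) (by omega)
    refine ⟨L, fun j => ?_⟩
    rw [H j]
    rcases Nat.lt_trichotomy j s with hlt | heq | hgt
    · rw [if_neg (by omega), if_neg (by omega)]
      simp only [List.getD_eq_getElem?_getD]
      rw [List.getElem?_set, if_neg (by omega)]
    · subst heq
      rw [if_neg (by omega), if_pos (le_refl j)]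
      rw [List.getD_eq_getElem?_getD, List.getElem?_set, if_pos rfl,
        if_pos (by omega : j < rss.length)]
      simp [List.getD_eq_getElem?_getD]
    · rw [if_pos (by omega), if_pos (by omega)]
      have h1 : j - s = (j - (s + 1)) + 1 := by omega
      rw [h1, List.getElem?_cons_succ]
      have hset : (rss.set s (rss.getD s [] ++ [x])).getD j [] = rss.getD j [] := by
        simp only [List.getD_eq_getElem?_getD]
        rw [List.getElem?_set, if_neg (by omega)]
      rw [hset]

-- outer distribution loop of A over the sorted key list
lemma pvOuter (N : Nat) (tsd : List (List (String × Int))) (ks : List Int) :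
    ∀ (rss : List (List (List (String × Int)))),
      rss.length = N → (∀ k ∈ ks, (pvGroup tsd k).length ≤ N) →
      (ks.foldl (fun runs k =>
          (PySem.List.enumerate (pvGroup tsd k)).foldl (fun runs p =>
            if p.1 < (N : Int) then
              PySem.List.pySetD runs p.1 (PySem.List.pyGetD runs p.1 [] ++ [p.2])
            else runs) runs) rss).length = N ∧
      ∀ j : Nat, (ks.foldl (fun runs k =>
          (PySem.List.enumerate (pvGroup tsd k)).foldl (fun runs p =>
            if p.1 < (N : Int) then
              PySem.List.pySetD runs p.1 (PySem.List.pyGetD runs p.1 [] ++ [p.2])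
            else runs) runs) rss).getD j []
        = rss.getD j [] ++ ks.flatMap (fun k => ((pvGroup tsd k)[j]?).toList) := by
  induction ks with
  | nil => intro rss hlen _hb; exact ⟨hlen, fun j => by simp⟩
  | cons k ks ih =>
    intro rss hlen hb
    simp only [List.foldl_cons]
    obtain ⟨L1, H1⟩ := pvInner N (pvGroup tsd k) 0 rss hlen
      (by simpa using hb k (by simp))
    simp only [Nat.cast_zero] at L1 H1
    obtain ⟨L2, H2⟩ := ih _ L1 (fun k' hk' => hb k' (List.mem_cons_of_mem _ hk'))
    refine ⟨L2, fun j => ?_⟩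
    rw [H2 j, H1 j]
    simp [List.append_assoc]

-- A computes the canonical transposed grouping
lemma pvA_canon (tsd : List (List (String × Int))) (hnil : tsd ≠ []) (N : Nat)
    (hmax : PySem.List.max? ((PySem.Set.ofList (tsd.map pvIter)).map
        (fun k => (pvGroup tsd k).length)) (fun x => x) = some N) :
    group_time_series_by_run_py tsd
      = (List.range N).map (fun j =>
          (PySem.List.sorted (PySem.Set.ofList (tsd.map pvIter)) (fun k => k)).flatMap
            (fun k => ((pvGroup tsd k)[j]?).toList)) := by
  have hstep : (fun (d : PySem.Dict Int (List (List (String × Int)))) row =>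
      (if d.contains (pvIter row) then d else d.insert (pvIter row) []).modify (pvIter row) []
        (fun ms => ms ++ [row]))
      = fun d row => d.modify (pvIter row) [] (fun ms => ms ++ [row]) := by
    funext d row; exact pvStepA_eq d row
  set D := tsd.foldl (fun d row => d.modify (pvIter row) [] (fun ms => ms ++ [row]))
    PySem.Dict.empty with hD
  have hkeys : D.keys = PySem.Set.ofList (tsd.map pvIter) := by
    have h := PySem.Dict.keys_foldl_modify_key tsd pvIter []
      (fun _ row => fun ms => ms ++ [row]) PySem.Dict.empty
    simpa [hD, PySem.Set.update, PySem.Set.ofList, PySem.Dict.keys, PySem.Dict.empty] using h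
  have hnodup : D.keys.Nodup := hkeys ▸ PySem.Set.nodup_ofList _
  have hgetD : ∀ c, D.getD c [] = pvGroup tsd c := by
    intro c
    have hpairs : D = (tsd.map (fun r => (pvIter r, r))).foldl
        (fun d p => d.modify p.1 [] (fun ms => ms ++ [p.2])) PySem.Dict.empty := by
      rw [hD, List.foldl_map]
    rw [hpairs, PySem.Dict.getD_foldl_modify_append]
    simp [pvGroup, List.filter_map, Function.comp_def,
      PySem.Dict.getD, PySem.Dict.get?, PySem.Dict.empty]
  have hvalues : D.values = (PySem.Set.ofList (tsd.map pvIter)).map (pvGroup tsd) := by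
    have hitems := PySem.Dict.items_eq_map_keys D hnodup []
    calc D.values = D.items.map (fun p => p.2) := rfl
      _ = D.keys.map (fun k => D.getD k []) := by rw [hitems, List.map_map]; rfl
      _ = (PySem.Set.ofList (tsd.map pvIter)).map (pvGroup tsd) := by
          rw [hkeys]; exact List.map_congr_left (fun k _ => hgetD k)
  have hKne : PySem.Set.ofList (tsd.map pvIter) ≠ [] := by
    rcases tsd with _ | ⟨r, t⟩
    · exact absurd rfl hnil
    · exact List.ne_nil_of_mem
        ((PySem.Set.mem_ofList (List.map pvIter (r :: t)) (pvIter r)).mpr (by simp))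
  have hitems_ne : ¬ D.items = [] := by
    intro h
    exact hKne (by rw [← hkeys]; simp [PySem.Dict.keys, h])
  have hbound : ∀ k ∈ PySem.Set.ofList (tsd.map pvIter), (pvGroup tsd k).length ≤ N := by
    intro k hk
    exact PySem.List.max?_isMax hmax _ (List.mem_map_of_mem hk)
  -- reduce the ported body
  simp only [group_time_series_by_run_py, if_neg hnil]
  rw [hstep, ← hD]
  have hNR : (if D.items = [] then 0
      else ((PySem.List.max? (D.values.map List.length) (fun x => x)).getD 0)) = N := by
    rw [if_neg hitems_ne, hvalues, List.map_map]
    have : (List.length ∘ pvGroup tsd) = fun k => (pvGroup tsd k).length := rfl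
    rw [this, hmax]
    rfl
  rw [hNR, hkeys]
  have hfun2 : (fun (runs : List (List (List (String × Int)))) (iter_num : Int) =>
      (PySem.List.enumerate (D.getD iter_num [])).foldl (fun runs p =>
        if p.1 < (N : Int) then
          PySem.List.pySetD runs p.1 (PySem.List.pyGetD runs p.1 [] ++ [p.2])
        else runs) runs)
      = (fun runs k =>
      (PySem.List.enumerate (pvGroup tsd k)).foldl (fun runs p =>
        if p.1 < (N : Int) then
          PySem.List.pySetD runs p.1 (PySem.List.pyGetD runs p.1 [] ++ [p.2])
        else runs) runs) := by
    funext runs k; rw [hgetD k]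
  rw [hfun2]
  obtain ⟨LA, HA⟩ := pvOuter N tsd
    (PySem.List.sorted (PySem.Set.ofList (tsd.map pvIter)) (fun k => k))
    (List.replicate N []) (by simp)
    (fun k hk => hbound k
      ((PySem.List.sorted_perm (PySem.Set.ofList (tsd.map pvIter)) (fun k => k) false).mem_iff.mp hk))
  apply List.ext_getElem (by simp [LA])
  intro i h1 h2
  have hGD := HA i
  have hrep : (List.replicate N ([] : List (List (String × Int)))).getD i [] = [] := by
    rw [List.getD_eq_getElem?_getD, List.getElem?_replicate]
    split <;> rfl
  rw [hrep, List.nil_append] at hGD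
  rw [List.getElem_map, List.getElem_range, ← hGD,
    List.getD_eq_getElem?_getD, List.getElem?_eq_getElem h1, Option.getD_some]

-- B computes the same canonical transposed grouping
lemma pvB_canon (tsd : List (List (String × Int))) (hnil : tsd ≠ []) (N : Nat)
    (hmax : PySem.List.max? ((PySem.Set.ofList (tsd.map pvIter)).map
        (fun k => (pvGroup tsd k).length)) (fun x => x) = some N) :
    group_time_series_by_run_py_alt tsd
      = (List.range N).map (fun j =>
          (PySem.List.sorted (PySem.Set.ofList (tsd.map pvIter)) (fun k => k)).flatMap
            (fun k => ((pvGroup tsd k)[j]?).toList)) := by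
  have hperm := PySem.List.sorted_perm (PySem.Set.ofList (tsd.map pvIter)) (fun k => k) false
  simp only [group_time_series_by_run_py_alt, if_neg hnil]
  have hNB : PySem.List.max? (((PySem.List.sorted (PySem.Set.ofList (tsd.map pvIter))
        (fun k => k)).map (fun k => tsd.filter (fun row => pvIter row == k))).map
        (fun g => (g.length : Int))) (fun x => x) = some ((N : Int)) := by
    apply pvMax?_eq_some
    · obtain ⟨k, hk, hlen⟩ := List.mem_map.mp (PySem.List.max?_mem hmax)
      rw [List.map_map]
      exact List.mem_map.mpr ⟨k, hperm.mem_iff.mpr hk, by simp [pvGroup] at hlen ⊢; omega⟩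
    · intro y hy
      rw [List.map_map] at hy
      obtain ⟨k, hk, rfl⟩ := List.mem_map.mp hy
      have hle := PySem.List.max?_isMax hmax ((pvGroup tsd k).length)
        (List.mem_map_of_mem (hperm.mem_iff.mp hk))
      simp only [Function.comp]
      exact_mod_cast (by simpa [pvGroup] using hle)
  rw [hNB]
  simp only [Option.getD_some]
  rw [PySem.List.pyRange_zero_nat, List.map_map]
  apply List.map_congr_left
  intro j _hj
  simp only [Function.comp]
  exact pvFilterMap_eq_flatMap (pvGroup tsd)
    (PySem.List.sorted (PySem.Set.ofList (tsd.map pvIter)) (fun k => k)) j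

-- ===== VERDICT (by name: the statement is the Claim_ definition above) =====
theorem group_time_series_by_run_py_spec : Claim_equal_group_time_series_by_run_py := by
  intro tsd _hDom
  unfold Spec_group_time_series_by_run_py
  by_cases hnil : tsd = []
  · subst hnil; rfl
  · have hKne : PySem.Set.ofList (tsd.map pvIter) ≠ [] := by
      rcases tsd with _ | ⟨r, t⟩
      · exact absurd rfl hnil
      · exact List.ne_nil_of_mem
          ((PySem.Set.mem_ofList (List.map pvIter (r :: t)) (pvIter r)).mpr (by simp))
    have hLne : (PySem.Set.ofList (tsd.map pvIter)).map (fun k => (pvGroup tsd k).length) ≠ [] := by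
      simpa using hKne
    obtain ⟨N, hmax⟩ := Option.isSome_iff_exists.mp (pvMax?_isSome _ hLne)
    rw [pvA_canon tsd hnil N hmax, pvB_canon tsd hnil N hmax]
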